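-- pv_equiv track=rewrite | github.com/benlimsh/BootCamp2017 | Labs/Computation/Week 1/shutthebox.py | psl
-- ===== SOURCE A (Python) =====
-- import itertools
--
-- def psl(list1, x):
--     count=1
--     for i in range(len(list1)):
--         for c in itertools.combinations(list1, i):
--             if sum(c) == x:
--                 count=count+1
--     if count>1:
--         return True
--     else:
--         return False
-- ===== SOURCE B (Python) =====
-- def psl(list1, x):
--     # subset-sum DP: f = sums reachable by any subset of the prefix,
--     # g = sums reachable by a subset omitting at least one element (proper subset)
--     f = {0}
--     g = set()
--     for a in list1:
--         g = f | {s + a for s in g}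
--         f = f | {s + a for s in f}
--     return x in g
-- ===== Notes on version B (the rewrite author's own statement) =====
-- stated objective: faster
-- what changed: Replaces the enumeration of all 2^n combinations (grouped by size) with a one-pass subset-sum DP over two sets of reachable sums (all subsets vs. proper subsets).
import Mathlib
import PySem

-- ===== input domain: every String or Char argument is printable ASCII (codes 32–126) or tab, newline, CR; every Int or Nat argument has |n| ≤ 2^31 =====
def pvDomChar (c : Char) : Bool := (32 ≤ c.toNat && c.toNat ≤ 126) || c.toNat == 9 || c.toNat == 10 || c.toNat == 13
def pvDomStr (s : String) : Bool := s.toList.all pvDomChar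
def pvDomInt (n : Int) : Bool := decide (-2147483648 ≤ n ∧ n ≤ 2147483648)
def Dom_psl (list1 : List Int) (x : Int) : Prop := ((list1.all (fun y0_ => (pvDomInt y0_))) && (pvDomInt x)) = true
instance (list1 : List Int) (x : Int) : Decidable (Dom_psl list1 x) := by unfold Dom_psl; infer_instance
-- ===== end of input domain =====

-- B replaces A's enumeration of all combinations by a one-pass subset-sum DP over reachable sums.

-- ===== PORT A =====
-- itertools.combinations(list1, i), in itertools' order (first element chosen first)
def combos : Nat → List Int → List (List Int)
  | 0, _ => [[]]
  | _+1, [] => []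
  | i+1, a :: t => (combos i t).map (a :: ·) ++ combos (i+1) t

def psl (list1 : List Int) (x : Int) : Bool :=
  let count : Int := (List.range list1.length).foldl
    (fun count i => (combos i list1).foldl
      (fun count c => if c.sum == x then count + 1 else count) count) 1
  decide (count > 1)

-- ===== PORT B =====
-- f = sums of subsets of the processed prefix; g = sums of subsets omitting at least one processed element
def pslStep (fg : PySem.Set Int × PySem.Set Int) (a : Int) : PySem.Set Int × PySem.Set Int :=
  (PySem.Set.union fg.1 (fg.1.map (· + a)), PySem.Set.union fg.1 (fg.2.map (· + a)))

def psl_alt (list1 : List Int) (x : Int) : Bool :=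
  let fg := list1.foldl pslStep (PySem.Set.ofList [0], PySem.Set.empty)
  PySem.Set.contains fg.2 x

-- ===== PRECONDITION & SPEC =====
def Spec_psl (list1 : List Int) (x : Int) (out : Bool) : Prop := out = psl_alt list1 x
instance (list1 : List Int) (x : Int) (out : Bool) : Decidable (Spec_psl list1 x out) := by unfold Spec_psl; infer_instance

-- ===== CLAIM (what is proved, stated in full; the proofs are below) =====
def Claim_equal_psl : Prop := ∀ (list1 : List Int) (x : Int), Dom_psl list1 x → Spec_psl list1 x (psl list1 x)

-- ===== LEMMAS AND PROOFS =====

theorem mem_combos (i : Nat) (l c : List Int) :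
    c ∈ combos i l ↔ c.Sublist l ∧ c.length = i := by
  induction l generalizing i c with
  | nil =>
    cases i with
    | zero => simp [combos, List.length_eq_zero_iff]
    | succ i =>
      simp only [combos, List.not_mem_nil, false_iff, not_and]
      intro hs
      simp [List.sublist_nil.mp hs]
  | cons a t ih =>
    cases i with
    | zero =>
      simp only [combos, List.mem_singleton]
      constructor
      · rintro rfl; exact ⟨List.nil_sublist _, rfl⟩
      · rintro ⟨_, hl⟩; exact (List.length_eq_zero_iff.mp hl).symm ▸ rfl
    | succ i =>
      simp only [combos, List.mem_append, List.mem_map, ih]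
      constructor
      · rintro (⟨c', ⟨hs, hl⟩, rfl⟩ | ⟨hs, hl⟩)
        · exact ⟨List.cons_sublist_cons.mpr hs, by simp [hl]⟩
        · exact ⟨hs.cons _, hl⟩
      · rintro ⟨hs, hl⟩
        rcases List.sublist_cons_iff.mp hs with h | ⟨r, rfl, hr⟩
        · exact Or.inr ⟨h, hl⟩
        · exact Or.inl ⟨r, ⟨hr, by simpa using hl⟩, rfl⟩

theorem inner_foldl (x : Int) (L : List (List Int)) (k : Int) :
    L.foldl (fun count c => if c.sum == x then count + 1 else count) k
      = k + (L.countP (fun c => c.sum == x) : Int) := by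
  induction L generalizing k with
  | nil => simp
  | cons c L ih =>
    simp only [List.foldl_cons, List.countP_cons, ih]
    by_cases h : c.sum = x
    · simp only [h, beq_self_eq_true, if_true]
      push_cast; ring
    · simp [h]

theorem outer_foldl (x : Int) (l : List Int) (L : List Nat) (k : Int) :
    L.foldl (fun count i => (combos i l).foldl
        (fun count c => if c.sum == x then count + 1 else count) count) k
      = k + ((L.map (fun i => (combos i l).countP (fun c => c.sum == x))).sum : Int) := by
  induction L generalizing k with
  | nil => simp
  | cons i L ih =>
    rw [List.foldl_cons, inner_foldl, ih]
    simp only [List.map_cons, List.sum_cons]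
    push_cast
    ring

theorem psl_true_iff (l : List Int) (x : Int) :
    psl l x = true ↔ ∃ c : List Int, c.Sublist l ∧ c.length < l.length ∧ c.sum = x := by
  simp only [psl, outer_foldl, decide_eq_true_eq]
  constructor
  · intro h
    have hx : (List.range l.length).map (fun i => (combos i l).countP (fun c => c.sum == x)) ≠
        (List.range l.length).map (fun _ => 0) := by
      intro he
      rw [he] at h
      simp at h
    have : ∃ i ∈ List.range l.length, (combos i l).countP (fun c => c.sum == x) ≠ 0 := by
      by_contra hc
      push Not at hc
      exact hx (List.map_congr_left (fun i hi => hc i hi))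
    obtain ⟨i, hi, hcnt⟩ := this
    obtain ⟨c, hc, hcs⟩ := List.countP_pos_iff.mp (Nat.pos_of_ne_zero hcnt)
    obtain ⟨hs, hl⟩ := (mem_combos i l c).mp hc
    exact ⟨c, hs, hl ▸ List.mem_range.mp hi, by simpa using hcs⟩
  · rintro ⟨c, hs, hl, rfl⟩
    have hc : c ∈ combos c.length l := (mem_combos _ _ _).mpr ⟨hs, rfl⟩
    have hcnt : 0 < (combos c.length l).countP (fun d => d.sum == c.sum) :=
      List.countP_pos_iff.mpr ⟨c, hc, by simp⟩
    have hmem : (combos c.length l).countP (fun d => d.sum == c.sum) ∈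
        (List.range l.length).map (fun i => (combos i l).countP (fun d => d.sum == c.sum)) :=
      List.mem_map.mpr ⟨c.length, List.mem_range.mpr hl, rfl⟩
    have := List.le_sum_of_mem hmem
    omega

theorem fold_mem (l : List Int) (f g : PySem.Set Int) (hgf : ∀ t, t ∈ g → t ∈ f) :
    (∀ s, s ∈ (l.foldl pslStep (f, g)).1 ↔ ∃ c : List Int, c.Sublist l ∧ ∃ t ∈ f, t + c.sum = s) ∧
    (∀ s, s ∈ (l.foldl pslStep (f, g)).2 ↔
      (∃ c : List Int, c.Sublist l ∧ c.length < l.length ∧ ∃ t ∈ f, t + c.sum = s) ∨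
      (∃ c : List Int, c.Sublist l ∧ ∃ t ∈ g, t + c.sum = s)) := by
  induction l generalizing f g with
  | nil =>
    constructor
    · intro s
      simp only [List.foldl_nil]
      constructor
      · intro hs; exact ⟨[], List.Sublist.refl _, s, hs, by simp⟩
      · rintro ⟨c, hc, t, ht, rfl⟩
        simp [List.sublist_nil.mp hc] at ht ⊢
        simpa using ht
    · intro s
      simp only [List.foldl_nil]
      constructor
      · intro hs
        exact Or.inr ⟨[], List.Sublist.refl _, s, hs, by simp⟩
      · rintro (⟨c, hc, hl, _⟩ | ⟨c, hc, t, ht, rfl⟩)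
        · simp [List.sublist_nil.mp hc] at hl
        · simp [List.sublist_nil.mp hc] at ht ⊢
          simpa using ht
  | cons a l ih =>
    have hgf' : ∀ t, t ∈ (pslStep (f, g) a).2 → t ∈ (pslStep (f, g) a).1 := by
      intro t ht
      simp only [pslStep, PySem.Set.mem_union, List.mem_map] at ht ⊢
      rcases ht with h | ⟨u, hu, rfl⟩
      · exact Or.inl h
      · exact Or.inr ⟨u, hgf u hu, rfl⟩
    obtain ⟨ih1, ih2⟩ := ih (pslStep (f, g) a).1 (pslStep (f, g) a).2 hgf'
    constructor
    · intro s
      rw [List.foldl_cons, show l.foldl pslStep (pslStep (f,g) a) = l.foldl pslStep ((pslStep (f,g) a).1, (pslStep (f,g) a).2) from rfl, ih1]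
      simp only [pslStep, PySem.Set.mem_union, List.mem_map]
      constructor
      · rintro ⟨c, hc, t, (ht | ⟨u, hu, rfl⟩), rfl⟩
        · exact ⟨c, hc.cons _, t, ht, rfl⟩
        · exact ⟨a :: c, List.cons_sublist_cons.mpr hc, u, hu, by simp; ring⟩
      · rintro ⟨c, hc, t, ht, rfl⟩
        rcases List.sublist_cons_iff.mp hc with h | ⟨r, rfl, hr⟩
        · exact ⟨c, h, t, Or.inl ht, rfl⟩
        · exact ⟨r, hr, t + a, Or.inr ⟨t, ht, rfl⟩, by simp; ring⟩
    · intro s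
      rw [List.foldl_cons, show l.foldl pslStep (pslStep (f,g) a) = l.foldl pslStep ((pslStep (f,g) a).1, (pslStep (f,g) a).2) from rfl, ih2]
      simp only [pslStep, PySem.Set.mem_union, List.mem_map]
      constructor
      · rintro (⟨c, hc, hl, t, (ht | ⟨u, hu, rfl⟩), rfl⟩ | ⟨c, hc, t, (ht | ⟨u, hu, rfl⟩), rfl⟩)
        · exact Or.inl ⟨c, hc.cons _, by simp; omega, t, ht, rfl⟩
        · exact Or.inl ⟨a :: c, List.cons_sublist_cons.mpr hc, by simp; omega, u, hu, by simp; ring⟩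
        · exact Or.inl ⟨c, hc.cons _, by have := hc.length_le; simp; omega, t, ht, rfl⟩
        · exact Or.inr ⟨a :: c, List.cons_sublist_cons.mpr hc, u, hu, by simp; ring⟩
      · rintro (⟨c, hc, hl, t, ht, rfl⟩ | ⟨c, hc, t, ht, rfl⟩)
        · rcases List.sublist_cons_iff.mp hc with h | ⟨r, rfl, hr⟩
          · exact Or.inr ⟨c, h, t, Or.inl ht, rfl⟩
          · exact Or.inl ⟨r, hr, by simp at hl; omega, t + a, Or.inr ⟨t, ht, rfl⟩, by simp; ring⟩
        · rcases List.sublist_cons_iff.mp hc with h | ⟨r, rfl, hr⟩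
          · exact Or.inr ⟨c, h, t, Or.inl (hgf t ht), rfl⟩
          · exact Or.inr ⟨r, hr, t + a, Or.inr ⟨t, ht, rfl⟩, by simp; ring⟩

theorem psl_alt_true_iff (l : List Int) (x : Int) :
    psl_alt l x = true ↔ ∃ c : List Int, c.Sublist l ∧ c.length < l.length ∧ c.sum = x := by
  have h := (fold_mem l (PySem.Set.ofList [0]) PySem.Set.empty (by simp [PySem.Set.empty])).2 x
  simp only [psl_alt, PySem.Set.contains_iff]
  rw [h]
  constructor
  · rintro (⟨c, hc, hl, t, ht, rfl⟩ | ⟨c, hc, t, ht, rfl⟩)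
    · simp [PySem.Set.ofList] at ht
      exact ⟨c, hc, hl, by omega⟩
    · simp [PySem.Set.empty] at ht
  · rintro ⟨c, hc, hl, rfl⟩
    exact Or.inl ⟨c, hc, hl, 0, by simp [PySem.Set.ofList], by simp⟩

-- ===== VERDICT (by name: the statement is the Claim_ definition above) =====
theorem psl_spec : Claim_equal_psl := by
  intro list1 x _
  unfold Spec_psl
  rw [Bool.eq_iff_iff, psl_true_iff, psl_alt_true_iff]
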